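-- pv_equiv track=rewrite | github.com/Parvez13/Placement_Assignment-Sohail_Parvez- | Pre_Placement/Assignment/Strings_Lecture_1/question_5.py | reverse_kelements
-- ===== SOURCE A (Python) =====
-- def reverse_kelements(s, k):
--     def swap(text, left, right):
--             while left < right:
--                 text[left], text[right] = text[right], text[left]
--                 left += 1
--                 right -= 1
--
--
--     i = 0
--     arr = list(s)
--
--     while i < len(s):
--         j = min(i+k-1, len(s)-1)
--         swap(arr, i, j)
--         i += 2*k
--     return "".join(arr)
-- ===== SOURCE B (Python) =====
-- def reverse_kelements(s, k):
--     out = []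
--     rev = True
--     for i in range(0, len(s), k):
--         block = s[i:i+k]
--         out.append(block[::-1] if rev else block)
--         rev = not rev
--     return "".join(out)
-- ===== Notes on version B (the rewrite author's own statement) =====
-- stated objective: simpler
-- what changed: A walks the character array with a while loop striding 2*k and reverses each chosen block in place via a two-pointer swap helper; B iterates the block starts with range(0, len(s), k), slices each block, reverses every other slice via a toggled boolean, and joins the pieces.
-- outside the precondition, e.g. on reverse_kelements('', 0): A returns '', B raises ValueError
import Mathlib
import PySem

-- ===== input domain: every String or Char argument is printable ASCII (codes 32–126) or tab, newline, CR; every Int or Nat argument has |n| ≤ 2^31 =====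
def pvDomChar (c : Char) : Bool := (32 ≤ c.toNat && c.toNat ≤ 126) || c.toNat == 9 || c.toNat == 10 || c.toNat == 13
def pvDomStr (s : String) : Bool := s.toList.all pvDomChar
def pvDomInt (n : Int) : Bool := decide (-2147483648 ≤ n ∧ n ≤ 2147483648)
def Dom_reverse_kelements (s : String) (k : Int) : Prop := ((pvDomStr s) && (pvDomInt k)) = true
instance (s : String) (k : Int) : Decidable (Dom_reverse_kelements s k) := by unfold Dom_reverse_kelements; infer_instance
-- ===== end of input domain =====

-- B reverses every other k-slice with a toggled boolean over range(0,len,k) instead of A's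
-- in-place two-pointer swaps strided by 2k; equal return values are proved for k ≥ 1.

-- ===== PORT A =====
-- swap(text, left, right): the inner while loop.  Reads/writes use pyGet?/pySet?; the `none`
-- arms are unreachable on every call the outer loop makes with left < right (indices in range).
def pvSwap (text : List Char) (left right : Int) : List Char :=
  if left < right then
    match PySem.List.pyGet? text right, PySem.List.pyGet? text left with
    | some a, some b =>
      match PySem.List.pySet? text left a with
      | some t1 =>
        match PySem.List.pySet? t1 right b with
        | some t2 => pvSwap t2 (left + 1) (right - 1)
        | none => t1
      | none => text
    | _, _ => text
  else text
termination_by (right - left).toNat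
decreasing_by omega

-- the outer `while i < len(s)` loop; fuel len(s)+1 suffices whenever k ≥ 1 (Pre_);
-- for k ≤ 0 and non-empty s the Python loop does not terminate.
def pvLoopA (arr : List Char) (n k i : Int) (fuel : Nat) : List Char :=
  match fuel with
  | 0 => arr
  | fuel + 1 =>
    if i < n then
      pvLoopA (pvSwap arr i (min (i + k - 1) (n - 1))) n k (i + 2 * k) fuel
    else arr

def reverse_kelements (s : String) (k : Int) : String :=
  let arr := s.toList
  String.ofList (pvLoopA arr (arr.length : Int) k 0 (arr.length + 1))

-- ===== PORT B =====
-- for i in range(0, len(s), k): append block (reversed when the toggle is on); join.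
-- block[::-1] is list reversal (PySem.List.slice?_none_none_neg_one).
def reverse_kelements_alt (s : String) (k : Int) : String :=
  let cs := s.toList
  let st := (PySem.List.pyRange 0 (cs.length : Int) k).foldl
    (fun (st : List (List Char) × Bool) i =>
      let block := PySem.Chars.slice cs (some i) (some (i + k))
      (st.1 ++ [if st.2 then block.reverse else block], !st.2))
    ([], true)
  String.ofList st.1.flatten

-- ===== PRECONDITION & SPEC =====
-- Pre_ excludes k ≤ 0 on non-empty strings, where A loops forever, and k = 0 on the empty
-- string, where A returns "" only because the loop body never runs while B's range(0,0,0) raises.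
def Pre_reverse_kelements (s : String) (k : Int) : Prop := 1 ≤ k ∨ (s = "" ∧ k ≠ 0)
instance (s : String) (k : Int) : Decidable (Pre_reverse_kelements s k) := by unfold Pre_reverse_kelements; infer_instance

def pvWitness_reverse_kelements : String × Int := ("abcdefg", 2)

def Spec_reverse_kelements (s : String) (k : Int) (out : String) : Prop := out = reverse_kelements_alt s k
instance (s : String) (k : Int) (out : String) : Decidable (Spec_reverse_kelements s k out) := by unfold Spec_reverse_kelements; infer_instance

-- ===== CLAIM (what is proved, stated in full; the proofs are below) =====
def Claim_equal_reverse_kelements : Prop := ∀ (s : String) (k : Int), Dom_reverse_kelements s k → Pre_reverse_kelements s k → Spec_reverse_kelements s k (reverse_kelements s k)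

-- ===== LEMMAS AND PROOFS =====

-- common reference: reverse every other (kn+1)-block, toggling `rev`
def gSpec (kn : Nat) (rev : Bool) : List Char → List Char
  | [] => []
  | c :: cs =>
    (if rev then ((c :: cs).take (kn+1)).reverse else (c :: cs).take (kn+1)) ++ gSpec kn (!rev) (cs.drop kn)
termination_by l => l.length
decreasing_by simp

theorem gSpec_nil (kn : Nat) (rev : Bool) : gSpec kn rev [] = [] := by rw [gSpec]

theorem gSpec_cons (kn : Nat) (rev : Bool) (rest : List Char) (h : rest ≠ []) :
    gSpec kn rev rest
      = (if rev then (rest.take (kn+1)).reverse else rest.take (kn+1)) ++ gSpec kn (!rev) (rest.drop (kn+1)) := by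
  match rest with
  | [] => exact absurd rfl h
  | c :: cs => rw [gSpec]; simp

-- A's single iteration covers two blocks of B
theorem gSpec_two (kn : Nat) (rest : List Char) :
    gSpec kn true rest
      = (rest.take (kn+1)).reverse ++ ((rest.drop (kn+1)).take (kn+1))
          ++ gSpec kn true ((rest.drop (kn+1)).drop (kn+1)) := by
  match rest with
  | [] => simp [gSpec_nil]
  | c :: cs =>
    rw [gSpec_cons kn true _ (by simp)]
    rcases h : (c :: cs).drop (kn+1) with _ | ⟨d, u⟩
    · simp [gSpec_nil]
    · simp only [Bool.not_true]
      rw [gSpec_cons kn false (d :: u) (by simp)]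
      simp

theorem get_mid (pre mid post : List Char) (j : Nat) (h : j < mid.length) :
    PySem.List.pyGet? (pre ++ mid ++ post) ((pre.length + j : Nat) : Int) = some mid[j] := by
  rw [PySem.List.pyGet?_natCast, List.append_assoc,
      List.getElem?_append_right (by omega), List.getElem?_append_left (by omega)]
  simp [h]

theorem set_mid (pre mid post : List Char) (j : Nat) (h : j < mid.length) (v : Char) :
    PySem.List.pySet? (pre ++ mid ++ post) ((pre.length + j : Nat) : Int) v
      = some (pre ++ mid.set j v ++ post) := by
  simp only [PySem.List.pySet?, PySem.List.pyIdx?]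
  rw [if_pos (by positivity), if_pos (by simp; omega)]
  simp only [Option.map_some]
  congr 1
  rw [List.append_assoc, List.set_append, if_neg (by omega), List.set_append, if_pos (by omega)]
  have hj : ((pre.length : Int) + (j : Int)).toNat - pre.length = j := by omega
  simp [hj]

theorem swap_spec (pre mid post : List Char) :
    pvSwap (pre ++ mid ++ post) (pre.length) ((pre.length : Int) + mid.length - 1)
      = pre ++ mid.reverse ++ post := by
  obtain ⟨N, hN⟩ : ∃ N, mid.length ≤ N := ⟨mid.length, le_rfl⟩
  induction N generalizing pre mid post with
  | zero =>
    have : mid = [] := by rw [List.eq_nil_iff_length_eq_zero]; omega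
    subst this
    rw [pvSwap]; simp
  | succ N IH =>
  rcases mid.eq_nil_or_concat with rfl | ⟨t, d, rfl⟩
  · rw [pvSwap]; simp
  · simp only [List.concat_eq_append]
    cases t with
    | nil => rw [pvSwap]; simp
    | cons c ms =>
      have hr : (pre.length : Int) + (((c :: ms) ++ [d]).length : Int) - 1
          = ((pre.length + (ms.length + 1) : Nat) : Int) := by simp; ring
      have hl : (pre.length : Int) = ((pre.length + 0 : Nat) : Int) := by simp
      have hget_r : PySem.List.pyGet? (pre ++ ((c :: ms) ++ [d]) ++ post) ((pre.length + (ms.length + 1) : Nat) : Int) = some d := by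
        rw [get_mid pre _ post (ms.length + 1) (by simp)]
        congr 1
        simp
      have hget_l : PySem.List.pyGet? (pre ++ ((c :: ms) ++ [d]) ++ post) ((pre.length + 0 : Nat) : Int) = some c := by
        rw [get_mid pre _ post 0 (by simp)]
        simp
      have hset1 : PySem.List.pySet? (pre ++ ((c :: ms) ++ [d]) ++ post) ((pre.length + 0 : Nat) : Int) d
          = some (pre ++ ((d :: ms) ++ [d]) ++ post) := by
        rw [set_mid pre _ post 0 (by simp) d]
        simp
      have hset2 : PySem.List.pySet? (pre ++ ((d :: ms) ++ [d]) ++ post) ((pre.length + (ms.length + 1) : Nat) : Int) c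
          = some (pre ++ ((d :: ms) ++ [c]) ++ post) := by
        rw [set_mid pre _ post (ms.length + 1) (by simp) c]
        congr 3
        rw [List.set_append, if_neg (by simp)]
        simp
      rw [pvSwap, if_pos (by simp; omega), hr, hl]
      simp only [hget_r, hget_l, hset1, hset2]
      have ht2 : pre ++ ((d :: ms) ++ [c]) ++ post = (pre ++ [d]) ++ ms ++ ([c] ++ post) := by simp
      have hil : ((pre.length + 0 : Nat) : Int) + 1 = (((pre ++ [d]).length : Nat) : Int) := by simp
      have hir : ((pre.length + (ms.length + 1) : Nat) : Int) - 1
          = (((pre ++ [d]).length : Nat) : Int) + ((ms.length : Nat) : Int) - 1 := by simp; ring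
      rw [ht2, hil, hir, IH (pre ++ [d]) ms ([c] ++ post) (by simp at hN; omega)]
      simp

theorem loopA_spec (kn : Nat) (k : Int) (hk : k = (kn : Int) + 1) (fuel : Nat) (rest pre : List Char)
    (hfuel : rest.length + 1 ≤ fuel) :
    pvLoopA (pre ++ rest) ((pre.length + rest.length : Nat)) k (pre.length) fuel
      = pre ++ gSpec kn true rest := by
  induction fuel using Nat.strong_induction_on generalizing rest pre with
  | _ fuel IH =>
  obtain ⟨f, rfl⟩ : ∃ f, fuel = f + 1 := ⟨fuel - 1, by omega⟩
  rcases rest with _ | ⟨c, cs⟩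
  · rw [pvLoopA, if_neg (by simp)]; simp [gSpec_nil]
  · rw [pvLoopA, if_pos (by simp)]
    have hmlen : ((c :: cs).take (kn+1)).length = min (kn+1) (c :: cs).length := by simp
    have hj : min ((pre.length : Int) + k - 1) (((pre.length + (c :: cs).length : Nat) : Int) - 1)
        = (pre.length : Int) + (((c :: cs).take (kn+1)).length : Int) - 1 := by
      rw [hk]; push_cast [hmlen]; omega
    have hsplit : pre ++ (c :: cs) = pre ++ (c :: cs).take (kn+1) ++ (c :: cs).drop (kn+1) := by simp
    rw [hj, hsplit, swap_spec pre ((c :: cs).take (kn+1)) ((c :: cs).drop (kn+1))]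
    rw [gSpec_two kn (c :: cs)]
    by_cases hlen : 2 * (kn + 1) ≤ (c :: cs).length
    · have harr : pre ++ ((c :: cs).take (kn+1)).reverse ++ (c :: cs).drop (kn+1)
          = (pre ++ ((c :: cs).take (kn+1)).reverse ++ ((c :: cs).drop (kn+1)).take (kn+1))
            ++ (((c :: cs).drop (kn+1)).drop (kn+1)) := by simp
      have hn : ((pre.length + (c :: cs).length : Nat) : Int)
          = (((pre ++ ((c :: cs).take (kn+1)).reverse ++ ((c :: cs).drop (kn+1)).take (kn+1)).length
              + (((c :: cs).drop (kn+1)).drop (kn+1)).length : Nat) : Int) := by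
        simp; omega
      have hi : (pre.length : Int) + 2 * k
          = (((pre ++ ((c :: cs).take (kn+1)).reverse ++ ((c :: cs).drop (kn+1)).take (kn+1)).length : Nat) : Int) := by
        rw [hk]; simp at hlen ⊢; omega
      rw [harr, hn, hi, IH f (by omega) (((c :: cs).drop (kn+1)).drop (kn+1))
            (pre ++ ((c :: cs).take (kn+1)).reverse ++ ((c :: cs).drop (kn+1)).take (kn+1)) (by simp at hfuel ⊢; omega)]
      simp
    · obtain ⟨f', rfl⟩ : ∃ f', f = f' + 1 := ⟨f - 1, by simp at hfuel; omega⟩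
      rw [pvLoopA, if_neg (by simp at hlen; rw [hk]; simp; omega)]
      have h1 : ((c :: cs).drop (kn+1)).take (kn+1) = (c :: cs).drop (kn+1) :=
        List.take_of_length_le (by simp at hlen; simp; omega)
      have h2 : ((c :: cs).drop (kn+1)).drop (kn+1) = [] :=
        List.drop_eq_nil_of_le (by simp at hlen; simp; omega)
      rw [h1, h2, gSpec_nil]
      simp

theorem pyRange_pos_nil (a b s : Int) (hs : 0 < s) (h : b ≤ a) :
    PySem.List.pyRange a b s = [] := by
  rw [PySem.List.pyRange_of_pos _ _ hs, if_neg (by omega)]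
  simp

theorem pyRange_pos_cons (a b s : Int) (hs : 0 < s) (h : a < b) :
    PySem.List.pyRange a b s = a :: PySem.List.pyRange (a + s) b s := by
  rw [PySem.List.pyRange_of_pos _ _ hs, PySem.List.pyRange_of_pos _ _ hs, if_pos h]
  have hX : 0 ≤ b - a - 1 := by omega
  have h1 : (b - a + s - 1) / s = (b - a - 1) / s + 1 := by
    have h0 := Int.add_mul_ediv_right (b - a - 1) 1 (show s ≠ 0 by omega)
    rw [show b - a + s - 1 = b - a - 1 + 1 * s by ring, h0]
  by_cases h2 : a + s < b
  · rw [if_pos h2]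
    have h3 : b - (a + s) + s - 1 = b - a - 1 := by ring
    have h4 : 0 ≤ (b - a - 1) / s := Int.ediv_nonneg hX (by omega)
    have h5 : ((b - a - 1) / s + 1).toNat = ((b - a - 1) / s).toNat + 1 := by omega
    rw [h3, h1, h5, List.range_succ_eq_map, List.map_cons, List.map_map]
    refine congrArg₂ List.cons (by simp) ?_
    refine List.map_congr_left ?_
    intro m _
    simp [Nat.succ_eq_add_one]
    ring
  · rw [if_neg h2]
    have h7 : (b - a - 1) / s = 0 := Int.ediv_eq_zero_of_lt hX (by omega)
    rw [h1, h7]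
    simp

theorem foldB_spec (kn : Nat) (k : Int) (hk : k = (kn : Int) + 1) (cs : List Char)
    (rest pre : List Char) (acc : List (List Char)) (rev : Bool) (hcs : cs = pre ++ rest) :
    ((PySem.List.pyRange (pre.length) (cs.length : Int) k).foldl
      (fun (st : List (List Char) × Bool) i =>
        (st.1 ++ [if st.2 then (PySem.Chars.slice cs (some i) (some (i + k))).reverse
                  else PySem.Chars.slice cs (some i) (some (i + k))], !st.2))
      (acc, rev)).1.flatten
      = acc.flatten ++ gSpec kn rev rest := by
  obtain ⟨N, hN⟩ : ∃ N, rest.length ≤ N := ⟨rest.length, le_rfl⟩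
  induction N generalizing rest pre acc rev with
  | zero =>
    have hrest : rest = [] := by rw [List.eq_nil_iff_length_eq_zero]; omega
    subst hrest; subst hcs
    rw [pyRange_pos_nil _ _ _ (by omega) (by simp)]
    simp [gSpec_nil]
  | succ N IH =>
    rcases rest with _ | ⟨c, cs'⟩
    · subst hcs
      rw [pyRange_pos_nil _ _ _ (by omega) (by simp)]
      simp [gSpec_nil]
    · subst hcs
      rw [pyRange_pos_cons _ _ _ (by omega) (by simp), List.foldl_cons]
      have hblock : PySem.Chars.slice (pre ++ (c :: cs')) (some (pre.length))
            (some ((pre.length : Int) + k))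
          = (c :: cs').take (kn+1) := by
        show PySem.List.slice (pre ++ (c :: cs')) (some (pre.length)) (some ((pre.length : Int) + k))
          = (c :: cs').take (kn+1)
        rw [PySem.List.slice_toNat _ (by positivity) (by rw [hk]; positivity)]
        simp only [Int.toNat_natCast]
        rw [show ((pre.length : Int) + k).toNat - pre.length = kn + 1 by rw [hk]; omega]
        rw [List.drop_left]
      simp only [hblock]
      by_cases hsz : (c :: cs').length ≤ kn + 1
      · rw [pyRange_pos_nil _ _ _ (by omega) (by simp at hsz; rw [hk]; simp; omega)]
        rw [gSpec_cons kn rev (c :: cs') (by simp),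
            List.drop_eq_nil_of_le hsz, gSpec_nil]
        simp
      · have hstep : (pre.length : Int) + k
            = (((pre ++ (c :: cs').take (kn+1)).length : Nat) : Int) := by
          simp at hsz; rw [hk]; simp; omega
        rw [hstep]
        rw [IH ((c :: cs').drop (kn+1)) (pre ++ (c :: cs').take (kn+1))
              (acc ++ [if rev then ((c :: cs').take (kn+1)).reverse else (c :: cs').take (kn+1)]) (!rev)
              (by simp) (by simp at hN ⊢; omega)]
        rw [gSpec_cons kn rev (c :: cs') (by simp)]
        simp

-- ===== VERDICT (by name: the statement is the Claim_ definition above) =====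
theorem reverse_kelements_spec : Claim_equal_reverse_kelements := by
  intro s k _ hpre
  simp only [Pre_reverse_kelements] at hpre
  show reverse_kelements s k = reverse_kelements_alt s k
  rcases hpre with hk1 | ⟨hs, hk0⟩
  case inr =>
    subst hs
    simp only [reverse_kelements, reverse_kelements_alt, String.toList_empty, List.length_nil,
      Nat.cast_zero, pvLoopA, lt_irrefl, if_false]
    rcases lt_or_gt_of_ne hk0 with hneg | hpos
    · rw [PySem.List.pyRange_of_neg _ _ hneg]; simp
    · rw [pyRange_pos_nil _ _ _ hpos le_rfl]; simp
  obtain ⟨kn, hk⟩ : ∃ kn : Nat, k = (kn : Int) + 1 := ⟨(k - 1).toNat, by omega⟩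
  have hA := loopA_spec kn k hk (s.toList.length + 1) s.toList [] (by omega)
  have hB := foldB_spec kn k hk s.toList s.toList [] [] true rfl
  simp only [List.nil_append, List.length_nil, Nat.cast_zero, Nat.zero_add, List.flatten_nil] at hA hB
  exact congrArg String.ofList (hA.trans hB.symm)
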